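-- pv_equiv track=rewrite | github.com/AntonStepin/HW6_python | hw6.py | second_in_lst
-- ===== SOURCE A (Python) =====
-- def second_in_lst(user_lst:list):
--     # return  list(filter(lambda x: x for i, element in user_lst if element in user_lst[i]))
--     second_match = []
--     count= 0
--     history = []
--     for x in user_lst:
--         count = 0
--         for i in range(0,len(user_lst)):
--             if x in user_lst[i] and not x in history:
--                 count += 1
--                 if count == 2:
--                     history.append(x)
--                     second_match.append((i, user_lst[i]))
--     return second_match
-- ===== SOURCE B (Python) =====
-- def second_in_lst(user_lst: list):
--     # Loop interchange: one pass over positions maintaining per-value match state,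
--     # instead of rescanning the whole list for each value.
--     order = []                       # distinct values, first-appearance order
--     for x in user_lst:
--         if x not in order:
--             order.append(x)
--     once = []                        # values matched exactly once so far
--     found = {}                       # value -> (index, element) of its second match
--     for i, e in enumerate(user_lst):
--         for x in order:
--             if x in found or x not in e:
--                 continue
--             if x in once:
--                 found[x] = (i, e)
--             else:
--                 once.append(x)
--     return [found[x] for x in order if x in found]
-- ===== Notes on version B (the rewrite author's own statement) =====
-- stated objective: faster
-- what changed: A fixes each value x and rescans the whole list counting its containments; B inverts the loops: a single pass over the positions (i, e) updating per-value state (a 'once' list and a 'found' dict mapping value -> its second match), skipping a value as soon as its second match is recorded, then emits results in first-appearance order of the distinct values.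
import Mathlib
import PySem

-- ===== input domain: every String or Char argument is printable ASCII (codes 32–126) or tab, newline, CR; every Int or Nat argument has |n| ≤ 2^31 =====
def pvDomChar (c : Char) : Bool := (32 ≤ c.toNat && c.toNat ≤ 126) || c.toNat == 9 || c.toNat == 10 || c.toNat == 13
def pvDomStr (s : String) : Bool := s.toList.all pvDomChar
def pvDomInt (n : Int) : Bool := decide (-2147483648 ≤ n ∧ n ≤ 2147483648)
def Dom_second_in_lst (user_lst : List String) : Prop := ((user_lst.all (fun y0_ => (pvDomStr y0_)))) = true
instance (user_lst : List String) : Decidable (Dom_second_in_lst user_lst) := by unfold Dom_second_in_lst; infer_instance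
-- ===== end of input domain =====

-- B inverts A's loops: instead of rescanning all positions for each value, it makes ONE pass over
-- the positions, maintaining per-value match state (once/found), then emits in first-appearance
-- order, skipping a value once found; objective: faster (measured).

-- ===== PORT A =====
-- inner loop body: 'if x in user_lst[i] and not x in history: count += 1; if count == 2: …'
def aInner (l : List String) (x : String) (st2 : Int × List (Int × String) × List String)
    (i : Int) : Int × List (Int × String) × List String :=
  let e := PySem.List.pyGetD l i ""
  if PySem.Str.isIn x e && !(st2.2.2.contains x) then
    if st2.1 + 1 == 2 then (st2.1 + 1, st2.2.1 ++ [(i, e)], st2.2.2 ++ [x])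
    else (st2.1 + 1, st2.2.1, st2.2.2)
  else st2

-- outer loop body: 'count = 0; for i in range(0, len(user_lst)): …'
def aOuter (l : List String) (st : List (Int × String) × List String) (x : String) :
    List (Int × String) × List String :=
  ((PySem.List.pyRange 0 (PySem.List.len l) 1).foldl (aInner l x) (0, st.1, st.2)).2

def second_in_lst (user_lst : List String) : List (Int × String) :=
  (user_lst.foldl (aOuter user_lst) ([], [])).1

-- ===== PORT B =====
-- inner loop body over the distinct values x, for one position (i, e)
def bInner (ie : Int × String) (st : List String × PySem.Dict String (Int × String))
    (x : String) : List String × PySem.Dict String (Int × String) :=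
  if st.2.contains x || !(PySem.Str.isIn x ie.2) then st        -- 'if x in found or x not in e: continue'
  else if st.1.contains x then (st.1, st.2.insert x ie)         -- 'if x in once: found[x] = (i, e)'
  else (st.1 ++ [x], st.2)                                      -- 'else: once.append(x)'

-- outer loop body: one position (i, e) of enumerate(user_lst)
def bOuter (order : List String) (st : List String × PySem.Dict String (Int × String))
    (ie : Int × String) : List String × PySem.Dict String (Int × String) :=
  order.foldl (bInner ie) st

def second_in_lst_alt (user_lst : List String) : List (Int × String) :=
  let order := user_lst.foldl (fun o x => if o.contains x then o else o ++ [x]) []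
  let st := (PySem.List.enumerate user_lst 0).foldl (bOuter order) ([], PySem.Dict.empty)
  order.filterMap (fun x => st.2.get? x)                        -- '[found[x] for x in order if x in found]'

-- ===== PRECONDITION & SPEC =====
def Spec_second_in_lst (user_lst : List String) (out : List (Int × String)) : Prop := out = second_in_lst_alt user_lst
instance (user_lst : List String) (out : List (Int × String)) : Decidable (Spec_second_in_lst user_lst out) := by unfold Spec_second_in_lst; infer_instance

-- ===== CLAIM (what is proved, stated in full; the proofs are below) =====
def Claim_equal_second_in_lst : Prop := ∀ (user_lst : List String), Dom_second_in_lst user_lst → Spec_second_in_lst user_lst (second_in_lst user_lst)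

-- ===== LEMMAS AND PROOFS =====

-- ---- A-side characterisation: second_in_lst l = extractOf l (tblOf l l) ----
def idxsOf (l : List String) (x : String) : List Int :=
  ((PySem.List.enumerate l 0).filter (fun p => PySem.Str.isIn x p.2)).map (·.1)

def seenOf (p : List String) : List String :=
  p.foldl (fun s x => if s.contains x then s else s ++ [x]) []

def tblOf (l p : List String) : List (String × List Int) :=
  (seenOf p).map (fun y => (y, idxsOf l y))

def histOf (l p : List String) : List String :=
  (seenOf p).filter (fun y => 2 ≤ (idxsOf l y).length)

def bExtract (l : List String) (acc : List (Int × String)) (p : String × List Int) :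
    List (Int × String) :=
  if 2 ≤ p.2.length then
    let j := (PySem.List.pyGet? p.2 1).getD 0
    acc ++ [(j, PySem.List.pyGetD l j "")]
  else acc

def extractOf (l : List String) (t : List (String × List Int)) : List (Int × String) :=
  t.foldl (bExtract l) []

lemma inner_skip (l : List String) (x : String) (hist : List String)
    (h : hist.contains x = true) :
    ∀ (js : List Int) (c : Int) (sm : List (Int × String)),
      js.foldl (aInner l x) (c, sm, hist) = (c, sm, hist) := by
  intro js
  induction js with
  | nil => intro c sm; rfl
  | cons i js ih =>
    intro c sm
    have hm : x ∈ hist := List.contains_iff_mem.mp h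
    have step : aInner l x (c, sm, hist) i = (c, sm, hist) := by simp [aInner, hm]
    rw [List.foldl_cons, step, ih]

lemma inner_one (l : List String) (x : String) (hist : List String)
    (h : hist.contains x = false) :
    ∀ (js : List Int) (sm : List (Int × String)),
      (js.foldl (aInner l x) (1, sm, hist)).2 =
        match js.filter (fun i => PySem.Str.isIn x (PySem.List.pyGetD l i "")) with
        | [] => (sm, hist)
        | j :: _ => (sm ++ [(j, PySem.List.pyGetD l j "")], hist ++ [x]) := by
  intro js
  induction js with
  | nil => intro sm; rfl
  | cons i js ih =>
    intro sm
    have hm : x ∉ hist := by simpa using h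
    rw [List.foldl_cons, List.filter_cons]
    by_cases hc : PySem.Str.isIn x (PySem.List.pyGetD l i "") = true
    · have hc' : PySem.Chars.isIn x.toList (PySem.List.pyGetD l i "").toList = true := by simpa using hc
      have step : aInner l x (1, sm, hist) i
          = (2, sm ++ [(i, PySem.List.pyGetD l i "")], hist ++ [x]) := by
        simp [aInner, hc', hm]
      rw [step, inner_skip l x (hist ++ [x]) (by simp) js, if_pos hc]
    · have hc' : ¬ PySem.Chars.isIn x.toList (PySem.List.pyGetD l i "").toList = true := by
        simpa using hc
      have step : aInner l x (1, sm, hist) i = (1, sm, hist) := by simp [aInner, hc']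
      rw [step, if_neg hc, ih]

lemma inner_zero (l : List String) (x : String) (hist : List String)
    (h : hist.contains x = false) :
    ∀ (js : List Int) (sm : List (Int × String)),
      (js.foldl (aInner l x) (0, sm, hist)).2 =
        match js.filter (fun i => PySem.Str.isIn x (PySem.List.pyGetD l i "")) with
        | [] => (sm, hist)
        | [_] => (sm, hist)
        | _ :: j :: _ => (sm ++ [(j, PySem.List.pyGetD l j "")], hist ++ [x]) := by
  intro js
  induction js with
  | nil => intro sm; rfl
  | cons i js ih =>
    intro sm
    have hm : x ∉ hist := by simpa using h
    rw [List.foldl_cons, List.filter_cons]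
    by_cases hc : PySem.Str.isIn x (PySem.List.pyGetD l i "") = true
    · have hc' : PySem.Chars.isIn x.toList (PySem.List.pyGetD l i "").toList = true := by simpa using hc
      have step : aInner l x (0, sm, hist) i = (1, sm, hist) := by simp [aInner, hc', hm]
      rw [step, if_pos hc, inner_one l x hist h js sm]
      cases hf : js.filter (fun i => PySem.Str.isIn x (PySem.List.pyGetD l i "")) with
      | nil => rfl
      | cons j t => rfl
    · have hc' : ¬ PySem.Chars.isIn x.toList (PySem.List.pyGetD l i "").toList = true := by
        simpa using hc
      have step : aInner l x (0, sm, hist) i = (0, sm, hist) := by simp [aInner, hc']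
      rw [step, if_neg hc, ih]

lemma filter_range_eq_idxsOf (l : List String) (x : String) :
    (PySem.List.pyRange 0 (PySem.List.len l) 1).filter
        (fun i => PySem.Str.isIn x (PySem.List.pyGetD l i "")) = idxsOf l x := by
  unfold idxsOf
  rw [PySem.List.enumerate_eq_map_pyRange l "", List.filter_map, List.map_map]
  simp [Function.comp_def]

lemma mem_seenOf_aux (p : List String) : ∀ (s : List String) (y : String),
    y ∈ p.foldl (fun s x => if s.contains x then s else s ++ [x]) s ↔ y ∈ s ∨ y ∈ p := by
  induction p with
  | nil => simp
  | cons x p ih =>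
    intro s y
    simp only [List.foldl_cons]
    by_cases hx : s.contains x = true
    · have hxs : x ∈ s := List.contains_iff_mem.mp hx
      rw [if_pos hx, ih]
      constructor
      · rintro (h | h)
        · exact Or.inl h
        · exact Or.inr (List.mem_cons_of_mem _ h)
      · rintro (h | h)
        · exact Or.inl h
        · rcases List.mem_cons.mp h with rfl | h
          · exact Or.inl hxs
          · exact Or.inr h
    · rw [if_neg hx, ih]
      simp only [List.mem_append, List.mem_cons]
      tauto

lemma mem_seenOf (p : List String) (y : String) : y ∈ seenOf p ↔ y ∈ p := by
  unfold seenOf; rw [mem_seenOf_aux]; simp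

lemma seenOf_append_singleton (p : List String) (x : String) :
    seenOf (p ++ [x]) = if (seenOf p).contains x then seenOf p else seenOf p ++ [x] := by
  unfold seenOf; rw [List.foldl_append]; rfl

lemma two_le_idxs (l p r : List String) (x : String) (hl : l = p ++ x :: r) (hx : x ∈ p) :
    2 ≤ (idxsOf l x).length := by
  subst hl
  have hx2 : PySem.Str.isIn x x = true := (PySem.Str.isIn_iff_infix x x).mpr (List.infix_refl _)
  obtain ⟨k, hk, hkx⟩ := List.mem_iff_getElem.mp hx
  have hmem : ((0 : Int) + (k : Int), x) ∈ PySem.List.enumerate p 0 :=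
    (PySem.List.mem_enumerate_iff p 0 _).mpr ⟨k, hk, by rw [hkx]⟩
  have hmemf : ((0 : Int) + (k : Int), x)
      ∈ (PySem.List.enumerate p 0).filter (fun q => PySem.Str.isIn x q.2) :=
    List.mem_filter.mpr ⟨hmem, by simpa using hx2⟩
  have h1 : 1 ≤ ((PySem.List.enumerate p 0).filter (fun q => PySem.Str.isIn x q.2)).length :=
    List.length_pos_of_mem hmemf
  simp only [PySem.Str.isIn_eq] at h1
  have hx2' : PySem.Chars.isIn x.toList x.toList = true := by simpa using hx2
  unfold idxsOf
  rw [PySem.List.enumerate_append, List.filter_append, PySem.List.enumerate_cons,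
    List.filter_cons]
  simp [hx2']
  omega

lemma hist_contains_of_seen (l p r : List String) (x : String) (hl : l = p ++ x :: r)
    (hx : x ∈ p) : (histOf l p).contains x = true := by
  refine List.contains_iff_mem.mpr (List.mem_filter.mpr ⟨(mem_seenOf p x).mpr hx, ?_⟩)
  simpa using two_le_idxs l p r x hl hx

lemma outer_seen (l p r : List String) (x : String) (hl : l = p ++ x :: r) (hx : x ∈ p)
    (sm : List (Int × String)) :
    aOuter l (sm, histOf l p) x = (sm, histOf l p) := by
  unfold aOuter
  rw [inner_skip l x (histOf l p) (hist_contains_of_seen l p r x hl hx)]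

lemma hist_not_contains (l p : List String) (x : String) (hx : x ∉ p) :
    (histOf l p).contains x = false := by
  rw [Bool.eq_false_iff]
  intro h
  exact hx ((mem_seenOf p x).mp (List.mem_filter.mp (List.contains_iff_mem.mp h)).1)

lemma seen_not_contains (p : List String) (x : String) (hx : x ∉ p) :
    (seenOf p).contains x = false := by
  rw [Bool.eq_false_iff]
  intro h
  exact hx ((mem_seenOf p x).mp (List.contains_iff_mem.mp h))

lemma histOf_append_new (l p : List String) (x : String) (hx : x ∉ p) :
    histOf l (p ++ [x])
      = histOf l p ++ (if 2 ≤ (idxsOf l x).length then [x] else []) := by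
  unfold histOf
  rw [seenOf_append_singleton, seen_not_contains p x hx, if_neg (by simp), List.filter_append]
  by_cases h2 : 2 ≤ (idxsOf l x).length
  · simp [h2]
  · simp [h2]

lemma tblOf_append_new (l p : List String) (x : String) (hx : x ∉ p) :
    tblOf l (p ++ [x]) = tblOf l p ++ [(x, idxsOf l x)] := by
  unfold tblOf
  rw [seenOf_append_singleton, seen_not_contains p x hx, if_neg (by simp), List.map_append]
  rfl

lemma extract_append (l : List String) (t : List (String × List Int)) (e : String × List Int) :
    extractOf l (t ++ [e]) = bExtract l (extractOf l t) e := by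
  unfold extractOf; rw [List.foldl_append]; rfl

lemma outer_new (l p : List String) (x : String) (hx : x ∉ p)
    (sm : List (Int × String)) :
    aOuter l (sm, histOf l p) x
      = (bExtract l sm (x, idxsOf l x), histOf l (p ++ [x])) := by
  unfold aOuter
  rw [show ((0 : Int), ((sm, histOf l p) : List (Int × String) × List String).1,
      (sm, histOf l p).2) = ((0 : Int), sm, histOf l p) from rfl]
  rw [inner_zero l x (histOf l p) (hist_not_contains l p x hx)
    (PySem.List.pyRange 0 (PySem.List.len l) 1) sm]
  rw [filter_range_eq_idxsOf, histOf_append_new l p x hx]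
  cases hi : idxsOf l x with
  | nil => simp [bExtract]
  | cons j1 t =>
    cases t with
    | nil => simp [bExtract]
    | cons j2 t2 =>
      simp [bExtract, PySem.List.pyGet?, PySem.List.pyIdx?]

lemma tblOf_append_seen (l p : List String) (x : String) (hx : x ∈ p) :
    tblOf l (p ++ [x]) = tblOf l p ∧ histOf l (p ++ [x]) = histOf l p := by
  have hc : (seenOf p).contains x = true :=
    List.contains_iff_mem.mpr ((mem_seenOf p x).mpr hx)
  unfold tblOf histOf
  rw [seenOf_append_singleton, if_pos hc]
  exact ⟨rfl, rfl⟩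

lemma a_main (l : List String) :
    ∀ (rest p : List String), l = p ++ rest →
      rest.foldl (aOuter l) (extractOf l (tblOf l p), histOf l p)
        = (extractOf l (tblOf l (p ++ rest)), histOf l (p ++ rest)) := by
  intro rest
  induction rest with
  | nil => intro p _; simp
  | cons x rest ih =>
    intro p hl
    rw [List.foldl_cons]
    have hstep : aOuter l (extractOf l (tblOf l p), histOf l p) x
        = (extractOf l (tblOf l (p ++ [x])), histOf l (p ++ [x])) := by
      by_cases hx : x ∈ p
      · rw [outer_seen l p rest x hl hx, (tblOf_append_seen l p x hx).1,
          (tblOf_append_seen l p x hx).2]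
      · rw [outer_new l p x hx, tblOf_append_new l p x hx, extract_append]
    rw [hstep]
    have hl' : l = (p ++ [x]) ++ rest := by simpa using hl
    have := ih (p ++ [x]) hl'
    rw [this]
    simp

-- ---- B-side invariant ----
-- matches of x among the processed (index, element) pairs
def M (P : List (Int × String)) (x : String) : List (Int × String) :=
  P.filter (fun q => PySem.Str.isIn x q.2)

-- state of B's main loop is correct for value x after processing pairs P
def GoodAt (P : List (Int × String)) (st : List String × PySem.Dict String (Int × String))
    (x : String) : Prop :=
  (x ∈ st.1 ↔ 1 ≤ (M P x).length) ∧
  st.2.get? x = if 2 ≤ (M P x).length then (M P x)[1]? else none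

lemma M_append (P : List (Int × String)) (q : Int × String) (x : String) :
    M (P ++ [q]) x = M P x ++ (if PySem.Str.isIn x q.2 then [q] else []) := by
  unfold M
  rw [List.filter_append, List.filter_cons]
  split_ifs with h <;> simp

lemma bInner_untouched (q : Int × String) (st : List String × PySem.Dict String (Int × String))
    (x y : String) (hne : y ≠ x) :
    (y ∈ (bInner q st x).1 ↔ y ∈ st.1) ∧ (bInner q st x).2.get? y = st.2.get? y := by
  unfold bInner
  split_ifs with h1 h2
  · exact ⟨Iff.rfl, rfl⟩
  · exact ⟨Iff.rfl, PySem.Dict.get?_insert_of_ne _ _ hne⟩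
  · constructor
    · simp [hne]
    · rfl

lemma bInner_good (P : List (Int × String)) (q : Int × String)
    (st : List String × PySem.Dict String (Int × String)) (x : String)
    (h : GoodAt P st x) : GoodAt (P ++ [q]) (bInner q st x) x := by
  obtain ⟨h1, h2⟩ := h
  unfold bInner GoodAt
  rw [M_append]
  by_cases hf : st.2.contains x = true
  · -- already found: 2 ≤ |M P x|
    have hs : (st.2.get? x).isSome := by rw [← PySem.Dict.contains_eq_isSome_get?]; exact hf
    have h2le : 2 ≤ (M P x).length := by
      by_contra hn
      rw [h2, if_neg hn] at hs
      simp at hs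
    rw [if_pos (by simp [hf])]
    constructor
    · rw [h1]
      constructor
      · intro _; simp; omega
      · intro _; omega
    · rw [h2, if_pos h2le, if_pos (by simp; split_ifs <;> simp <;> omega)]
      rw [List.getElem?_append_left (by omega)]
  · have hf' : st.2.contains x = false := by simpa using hf
    by_cases hin : PySem.Str.isIn x q.2 = true
    · have hin' : PySem.Chars.isIn x.toList q.2.toList = true := by simpa using hin
      rw [if_neg (by simp [hf', hin']), if_pos hin]
      have hnone : st.2.get? x = none := by
        rw [PySem.Dict.get?_eq_none_iff_contains]; exact hf'
      have hlt2 : ¬ 2 ≤ (M P x).length := by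
        intro hge
        rw [h2, if_pos hge] at hnone
        have : (1 : ℕ) < (M P x).length := by omega
        simp [List.getElem?_eq_getElem this] at hnone
      by_cases ho : st.1.contains x = true
      · -- one match so far → this is the second
        have hx1 : x ∈ st.1 := List.contains_iff_mem.mp ho
        have hlen1 : (M P x).length = 1 := by
          have := h1.mp hx1; omega
        rw [if_pos ho]
        constructor
        · simp only []
          rw [h1]; simp [hlen1]
        · simp only []
          rw [PySem.Dict.get?_insert_self]
          have hcond : 2 ≤ (M P x ++ [q]).length := by simp [hlen1]
          rw [if_pos hcond]
          rw [List.getElem?_append_right (show (M P x).length ≤ 1 by omega)]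
          simp [hlen1]
      · -- zero matches so far → first match
        have hx1 : x ∉ st.1 := fun hm =>
          absurd (List.contains_iff_mem.mpr hm) (by simpa using ho)
        have hlen0 : (M P x).length = 0 := by
          by_contra hn
          exact hx1 (h1.mpr (by omega))
        rw [if_neg ho]
        constructor
        · simp [hlen0]
        · simp only []
          rw [h2]
          simp [hlen0]
    · have hin'' : PySem.Chars.isIn x.toList q.2.toList = false := by simpa using hin
      rw [if_pos (by simp [hin'']), if_neg hin]
      simpa using ⟨h1, h2⟩

lemma innerFold (P : List (Int × String)) (q : Int × String) :
    ∀ (todo : List String) (st : List String × PySem.Dict String (Int × String)),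
      todo.Nodup → (∀ x ∈ todo, GoodAt P st x) →
      (∀ x ∈ todo, GoodAt (P ++ [q]) (todo.foldl (bInner q) st) x) ∧
      (∀ y, y ∉ todo →
        (y ∈ (todo.foldl (bInner q) st).1 ↔ y ∈ st.1) ∧
        (todo.foldl (bInner q) st).2.get? y = st.2.get? y) := by
  intro todo
  induction todo with
  | nil => intro st _ _; exact ⟨by simp, fun y _ => ⟨Iff.rfl, rfl⟩⟩
  | cons x rest ih =>
    intro st hnd hg
    have hxr : x ∉ rest := (List.nodup_cons.mp hnd).1
    have hndr : rest.Nodup := (List.nodup_cons.mp hnd).2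
    have hgood_x : GoodAt (P ++ [q]) (bInner q st x) x :=
      bInner_good P q st x (hg x (by simp))
    have hg_rest : ∀ z ∈ rest, GoodAt P (bInner q st x) z := by
      intro z hz
      have hne : z ≠ x := fun h => hxr (h ▸ hz)
      obtain ⟨hu1, hu2⟩ := bInner_untouched q st x z hne
      obtain ⟨g1, g2⟩ := hg z (by simp [hz])
      exact ⟨hu1.trans g1, hu2.trans g2⟩
    obtain ⟨ih1, ih2⟩ := ih (bInner q st x) hndr hg_rest
    rw [List.foldl_cons]
    refine ⟨?_, ?_⟩
    · intro z hz
      rcases List.mem_cons.mp hz with rfl | hz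
      · obtain ⟨hu1, hu2⟩ := ih2 z hxr
        obtain ⟨g1, g2⟩ := hgood_x
        exact ⟨hu1.trans g1, hu2.trans g2⟩
      · exact ih1 z hz
    · intro y hy
      have hyr : y ∉ rest := fun h => hy (List.mem_cons_of_mem _ h)
      have hyx : y ≠ x := fun h => hy (by simp [h])
      obtain ⟨hu1, hu2⟩ := ih2 y hyr
      obtain ⟨v1, v2⟩ := bInner_untouched q st x y hyx
      exact ⟨hu1.trans v1, hu2.trans v2⟩

lemma outerFold (order : List String) (hnd : order.Nodup) :
    ∀ (rest P : List (Int × String)) (st : List String × PySem.Dict String (Int × String)),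
      (∀ x ∈ order, GoodAt P st x) →
      ∀ x ∈ order, GoodAt (P ++ rest) (rest.foldl (bOuter order) st) x := by
  intro rest
  induction rest with
  | nil => intro P st hg x hx; simpa using hg x hx
  | cons q rest ih =>
    intro P st hg x hx
    rw [List.foldl_cons]
    have hstep := (innerFold P q order st hnd hg).1
    have := ih (P ++ [q]) (bOuter order st q) hstep x hx
    simpa using this

lemma seenOf_nodup_aux (p : List String) : ∀ (s : List String), s.Nodup →
    (p.foldl (fun s x => if s.contains x then s else s ++ [x]) s).Nodup := by
  induction p with
  | nil => intro s h; simpa using h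
  | cons x p ih =>
    intro s hs
    rw [List.foldl_cons]
    by_cases hc : s.contains x = true
    · rw [if_pos hc]; exact ih s hs
    · rw [if_neg hc]
      refine ih _ ?_
      have hx : x ∉ s := fun hm =>
        absurd (List.contains_iff_mem.mpr hm) (by simpa using hc)
      simp [List.nodup_append, hs]
      exact fun a ha h => hx (h ▸ ha)

lemma seenOf_nodup (p : List String) : (seenOf p).Nodup :=
  seenOf_nodup_aux p [] List.nodup_nil

-- A's per-value emission, written as the option B's dict lookup produces
lemma extract_eq_filterMap (l : List String) :
    ∀ (ord : List String) (acc : List (Int × String)),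
      (ord.map (fun y => (y, idxsOf l y))).foldl (bExtract l) acc
        = acc ++ ord.filterMap (fun x =>
            if 2 ≤ (idxsOf l x).length then
              some ((PySem.List.pyGet? (idxsOf l x) 1).getD 0,
                PySem.List.pyGetD l ((PySem.List.pyGet? (idxsOf l x) 1).getD 0) "")
            else none) := by
  intro ord
  induction ord with
  | nil => intro acc; simp
  | cons x ord ih =>
    intro acc
    rw [List.map_cons, List.foldl_cons, List.filterMap_cons]
    by_cases h2 : 2 ≤ (idxsOf l x).length
    · rw [if_pos h2]
      have hstep : bExtract l acc (x, idxsOf l x)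
          = acc ++ [((PySem.List.pyGet? (idxsOf l x) 1).getD 0,
              PySem.List.pyGetD l ((PySem.List.pyGet? (idxsOf l x) 1).getD 0) "")] := by
        simp [bExtract, h2]
      rw [hstep, ih]
      simp
    · rw [if_neg h2]
      have hstep : bExtract l acc (x, idxsOf l x) = acc := by simp [bExtract, h2]
      rw [hstep, ih]

-- pointwise: the A-side option equals the B-side option
lemma option_pointwise (l : List String) (x : String) :
    (if 2 ≤ (idxsOf l x).length then
        some ((PySem.List.pyGet? (idxsOf l x) 1).getD 0,
          PySem.List.pyGetD l ((PySem.List.pyGet? (idxsOf l x) 1).getD 0) "")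
      else none)
    = (if 2 ≤ (M (PySem.List.enumerate l 0) x).length
        then (M (PySem.List.enumerate l 0) x)[1]? else none) := by
  have hidx : idxsOf l x = (M (PySem.List.enumerate l 0) x).map (·.1) := rfl
  have hlen : (idxsOf l x).length = (M (PySem.List.enumerate l 0) x).length := by
    rw [hidx, List.length_map]
  by_cases h2 : 2 ≤ (M (PySem.List.enumerate l 0) x).length
  · rw [if_pos (by omega), if_pos h2]
    have h1lt : 1 < (M (PySem.List.enumerate l 0) x).length := by omega
    set p := (M (PySem.List.enumerate l 0) x)[1] with hp
    have hget : (M (PySem.List.enumerate l 0) x)[1]? = some p :=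
      List.getElem?_eq_getElem h1lt
    have hpy : PySem.List.pyGet? (idxsOf l x) 1 = some p.1 := by
      have : ((1 : Nat) : Int) = (1 : Int) := by norm_num
      rw [← this, PySem.List.pyGet?_natCast, hidx, List.getElem?_map, hget]
      rfl
    have hpmem : p ∈ PySem.List.enumerate l 0 :=
      List.mem_of_mem_filter (List.getElem_mem h1lt)
    obtain ⟨k, hk, hpe⟩ := (PySem.List.mem_enumerate_iff l 0 p).mp hpmem
    have hp1 : p.1 = (k : Int) := by rw [hpe]; simp
    have hp2 : p.2 = l[k] := by rw [hpe]
    rw [hget, hpy]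
    simp only [Option.getD_some]
    have hval : PySem.List.pyGetD l p.1 "" = p.2 := by
      rw [hp1, PySem.List.pyGetD_natCast, List.getD_eq_getElem?_getD,
        List.getElem?_eq_getElem hk, hp2]
      rfl
    rw [hval]
  · rw [if_neg (by omega), if_neg h2]

theorem alt_characterisation (l : List String) :
    second_in_lst_alt l = (seenOf l).filterMap (fun x =>
      if 2 ≤ (M (PySem.List.enumerate l 0) x).length
        then (M (PySem.List.enumerate l 0) x)[1]? else none) := by
  show (seenOf l).filterMap
      (fun x => ((PySem.List.enumerate l 0).foldl (bOuter (seenOf l))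
        ([], PySem.Dict.empty)).2.get? x) = _
  have hinit : ∀ x ∈ seenOf l, GoodAt [] (([], PySem.Dict.empty) :
      List String × PySem.Dict String (Int × String)) x := by
    intro x _
    constructor
    · simp [M]
    · simp [M, PySem.Dict.get?_empty]
  have hfin := outerFold (seenOf l) (seenOf_nodup l) (PySem.List.enumerate l 0) []
    ([], PySem.Dict.empty) hinit
  apply List.filterMap_congr
  intro x hx
  exact ((hfin x hx).2).trans (by simp)

-- ===== VERDICT (by name: the statement is the Claim_ definition above) =====
theorem second_in_lst_spec : Claim_equal_second_in_lst := by
  intro l _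
  unfold Spec_second_in_lst second_in_lst
  have ha := a_main l l [] rfl
  rw [show (([], []) : List (Int × String) × List String)
      = (extractOf l (tblOf l []), histOf l []) from rfl, ha]
  simp only [List.nil_append]
  rw [alt_characterisation]
  show extractOf l (tblOf l l) = _
  unfold extractOf tblOf
  rw [extract_eq_filterMap l (seenOf l) []]
  rw [List.nil_append]
  apply List.filterMap_congr
  intro x _
  exact option_pointwise l x
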